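-- pv_equiv track=rewrite | github.com/guardkit/guardkit | guardkit/integrations/graphiti/parsers/project_overview.py | _get_content_body
-- ===== SOURCE A (Python) =====
-- def _get_content_body(content: str) -> str:
--     """Extract the body content (everything after the title).
--
--     Args:
--         content: The full markdown content.
--
--     Returns:
--         Content body without the title line.
--     """
--     lines = content.split("\n")
--     body_lines = []
--     past_title = False
--
--     for line in lines:
--         if not past_title:
--             if line.startswith("# "):
--                 past_title = True
--             continue
--         body_lines.append(line)
--
--     return "\n".join(body_lines).strip()
-- ===== SOURCE B (Python) =====
-- def _get_content_body(content: str) -> str: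
--     lines = content.split("\n")
--     for i, line in enumerate(lines):
--         if line.startswith("# "):
--             return "\n".join(lines[i + 1:]).strip()
--     return ""
-- ===== Notes on version B (the rewrite author's own statement) =====
-- stated objective: simpler
-- what changed: Replaces the whole-pass flag-and-accumulator loop with locate-then-slice: find the index of the first heading line, return early by joining and stripping the slice of the remaining lines, with an empty result when no heading exists.
import Mathlib
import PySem

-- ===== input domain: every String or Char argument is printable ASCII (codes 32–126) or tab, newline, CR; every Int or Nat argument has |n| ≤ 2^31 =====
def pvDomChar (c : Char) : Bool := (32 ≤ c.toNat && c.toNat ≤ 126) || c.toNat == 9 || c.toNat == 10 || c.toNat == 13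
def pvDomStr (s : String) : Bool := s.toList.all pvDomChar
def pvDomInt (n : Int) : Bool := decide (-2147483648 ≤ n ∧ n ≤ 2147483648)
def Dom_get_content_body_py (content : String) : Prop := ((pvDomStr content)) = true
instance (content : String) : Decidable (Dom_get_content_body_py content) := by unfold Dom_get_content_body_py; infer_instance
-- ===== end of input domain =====

-- B replaces A's full-pass boolean-flag accumulator loop with locate-the-first-heading-then-slice (simpler decomposition, same value).

-- ===== PORT A =====
-- one loop step of A: state = (past_title, body_lines)
def pvAStep (st : Bool × List String) (line : String) : Bool × List String :=
  if !st.1 then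
    (if PySem.Str.startswith line "# " then (true, st.2) else st)
  else (st.1, st.2 ++ [line])

def get_content_body_py (content : String) : String :=
  PySem.Str.strip (PySem.Str.join "\n"
    (((PySem.Str.split? content "\n").getD []).foldl pvAStep (false, [])).2)

-- ===== PORT B =====
-- B: find the index of the first line starting with "# "; '' if none, else join-and-strip the slice lines[i+1:]
def get_content_body_py_alt (content : String) : String :=
  match ((PySem.Str.split? content "\n").getD []).findIdx? (fun l => PySem.Str.startswith l "# ") with
  | none => ""
  | some i =>
      PySem.Str.strip (PySem.Str.join "\n"
        (PySem.List.slice ((PySem.Str.split? content "\n").getD []) (some ((i : Int) + 1)) none))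

-- ===== PRECONDITION & SPEC =====
def Spec_get_content_body_py (content : String) (out : String) : Prop := out = get_content_body_py_alt content
instance (content : String) (out : String) : Decidable (Spec_get_content_body_py content out) := by unfold Spec_get_content_body_py; infer_instance

-- ===== CLAIM (what is proved, stated in full; the proofs are below) =====
def Claim_equal_get_content_body_py : Prop := ∀ (content : String), Dom_get_content_body_py content → Spec_get_content_body_py content (get_content_body_py content)

-- ===== LEMMAS AND PROOFS =====

-- once past the title, A's loop appends every remaining line
theorem pvAStep_past (lines : List String) (acc : List String) :
    lines.foldl pvAStep (true, acc) = (true, acc ++ lines) := by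
  induction lines generalizing acc with
  | nil => simp
  | cons l rest ih => simp [pvAStep, ih]

-- A's accumulated body equals the lines after the first heading (none if no heading)
theorem pvA_body (lines : List String) :
    (lines.foldl pvAStep (false, [])).2 =
      match lines.findIdx? (fun l => PySem.Str.startswith l "# ") with
      | none => []
      | some i => lines.drop (i + 1) := by
  induction lines with
  | nil => simp
  | cons l rest ih =>
    rw [List.foldl_cons, List.findIdx?_cons]
    have hstep : pvAStep (false, ([] : List String)) l =
        if PySem.Str.startswith l "# " then (true, ([] : List String)) else (false, []) := by
      simp only [pvAStep, Bool.not_false, if_true]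
    by_cases h : PySem.Str.startswith l "# " = true
    · rw [hstep, if_pos h, if_pos h, pvAStep_past]; simp
    · rw [hstep, if_neg h, if_neg (by simpa using h), ih]
      cases hr : rest.findIdx? (fun l => PySem.Str.startswith l "# ") <;> simp

-- ===== VERDICT (by name: the statement is the Claim_ definition above) =====
theorem get_content_body_py_spec : Claim_equal_get_content_body_py := by
  intro content _
  unfold Spec_get_content_body_py get_content_body_py get_content_body_py_alt
  rw [pvA_body]
  cases hf : ((PySem.Str.split? content "\n").getD []).findIdx? (fun l => PySem.Str.startswith l "# ") with
  | none => simp only [hf]; decide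
  | some i =>
    simp only [hf]
    have hcast : ((i : Int) + 1) = (((i + 1 : Nat)) : Int) := by push_cast; ring
    rw [hcast, PySem.List.slice_from_natCast]
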